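-- pv_equiv track=rewrite | github.com/sashaBazarov/Ponyscript | lexer.py | find_classes
-- ===== SOURCE A (Python) =====
-- def find_classes(tokens:list):
--     classes = []
--     insert_indexes = []
--     for i in range(0, len(tokens)-1):
--         if tokens[i] == 'class':
--             classes.append(tokens[i+1])
--             j=0
--             while tokens[i+j] != "{":
--                 j+=1
--                 if tokens[i+j] == '{':
--                     insert_indexes.append(i+j+1)
--
--     updated_tokens = tokens
--     for i in insert_indexes:
--         tokens.insert(i, '\n')
--         tokens.insert(i+1, 'public:')
--
--
--     return classes, updated_tokens
-- ===== SOURCE B (Python) =====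
-- def find_classes(tokens: list):
--     n = len(tokens)
--     # backward pass: next_brace[i] = smallest j >= i with tokens[j] == '{', else None
--     next_brace = [None] * (n + 1)
--     for i in range(n - 1, -1, -1):
--         next_brace[i] = i if tokens[i] == '{' else next_brace[i + 1]
--     classes = []
--     insert_at = []
--     for i in range(n - 1):
--         if tokens[i] == 'class':
--             classes.append(tokens[i + 1])
--             b = next_brace[i + 1]
--             if b is not None:
--                 insert_at.append(b + 1)
--     for pos in insert_at:
--         tokens[pos:pos] = ['\n', 'public:']
--     return classes, tokens
-- ===== Notes on version B (the rewrite author's own statement) =====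
-- stated objective: alternative
-- what changed: B precomputes, in one backward pass, a table of each position's next '{' index, so the per-'class' forward rescan (A's while loop) becomes a single table lookup in one forward pass; the insertion positions are then applied by slice splicing instead of paired list.insert calls.
import Mathlib
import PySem

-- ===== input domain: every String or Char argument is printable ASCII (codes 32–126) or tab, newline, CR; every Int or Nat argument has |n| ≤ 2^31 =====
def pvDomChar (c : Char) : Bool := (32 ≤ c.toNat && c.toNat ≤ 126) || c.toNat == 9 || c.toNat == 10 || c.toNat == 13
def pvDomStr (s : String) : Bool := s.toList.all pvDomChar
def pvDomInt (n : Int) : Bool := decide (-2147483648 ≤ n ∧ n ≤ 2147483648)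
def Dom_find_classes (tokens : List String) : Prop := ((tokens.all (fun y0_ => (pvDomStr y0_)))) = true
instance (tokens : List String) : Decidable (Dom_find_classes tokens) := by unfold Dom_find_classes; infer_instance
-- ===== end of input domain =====

-- B replaces A's per-'class' forward rescan for the next '{' by a next-'{' table built in one
-- backward pass, and applies the inserts by slice splicing; equivalence is about the RETURN value
-- (the Python A mutates its argument in place via list.insert, and B mutates it the same way).

-- ===== PORT A =====
-- A's inner 'while tokens[i+j] != "{"' loop; fuel bounds the scan (Python raises IndexError where
-- pyGet? is none; the port then returns none and the outer loop keeps the old index list — inputs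
-- on which that happens are excluded by Pre_find_classes).
def pvScanA (tokens : List String) (i : Nat) : Nat → List Nat → Nat → Option (List Nat)
  | _, _, 0 => none
  | j, idxs, fuel+1 =>
    match PySem.List.pyGet? tokens ((i + j : Nat) : Int) with
    | none => none
    | some t =>
      if t = "{" then some idxs
      else
        match PySem.List.pyGet? tokens ((i + j + 1 : Nat) : Int) with
        | none => none
        | some t' => pvScanA tokens i (j+1) (if t' = "{" then idxs ++ [i + j + 2] else idxs) fuel

-- A's second loop: tokens.insert(i, '\n'); tokens.insert(i+1, 'public:')
def pvInsertLoopA (idxs : List Nat) (l : List String) : List String :=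
  idxs.foldl (fun (acc : List String) (p : Nat) =>
    PySem.List.insert (PySem.List.insert acc (p : Int) "\n") ((p : Int) + 1) "public:") l

def find_classes (tokens : List String) : List String × List String :=
  let st := (List.range (tokens.length - 1)).foldl (fun st i =>
    if tokens.getD i "" = "class" then
      let classes := st.1 ++ [tokens.getD (i+1) ""]
      match pvScanA tokens i 0 st.2 tokens.length with
      | some idxs => (classes, idxs)
      | none => (classes, st.2)       -- Python A raises IndexError here (outside Pre_)
    else st) (([] : List String), ([] : List Nat))
  (st.1, pvInsertLoopA st.2 tokens)

-- ===== PORT B =====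
-- backward pass: entry k is the smallest index ≥ k holding "{", none if there is none
-- (list of length tokens.length + 1, mirroring Source B's next_brace array)
def pvNextBrace : List String → Nat → List (Option Nat)
  | [], _ => [none]
  | t :: rest, i0 =>
    let tail := pvNextBrace rest (i0+1)
    (if t = "{" then some i0 else tail.headD none) :: tail

-- Source B's slice assignment tokens[pos:pos] = ['\n', 'public:'] (Python clamps pos to the length)
def pvSplice (l : List String) (p : Nat) : List String :=
  l.take p ++ ["\n", "public:"] ++ l.drop p

def find_classes_alt (tokens : List String) : List String × List String :=
  let nb := pvNextBrace tokens 0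
  let st := (List.range (tokens.length - 1)).foldl (fun st i =>
    if tokens.getD i "" = "class" then
      match nb.getD (i+1) none with
      | some p => (st.1 ++ [tokens.getD (i+1) ""], st.2 ++ [p + 1])
      | none => (st.1 ++ [tokens.getD (i+1) ""], st.2)   -- no later '{': record no insert position
    else st) (([] : List String), ([] : List Nat))
  (st.1, st.2.foldl pvSplice tokens)

-- ===== PRECONDITION & SPEC =====
-- Pre_ excludes exactly the inputs on which Python A raises IndexError: a 'class' token before the
-- last position with no '{' anywhere after it (A's while loop then runs off the end of the list).
def Pre_find_classes (tokens : List String) : Prop :=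
  ∀ i ∈ List.range (tokens.length - 1), tokens.getD i "" = "class" → "{" ∈ tokens.drop (i+1)
instance (tokens : List String) : Decidable (Pre_find_classes tokens) := by
  unfold Pre_find_classes; infer_instance

def pvWitness_find_classes : List String := ["class", "A", "{", "}"]

def Spec_find_classes (tokens : List String) (out : List String × List String) : Prop :=
  out = find_classes_alt tokens
instance (tokens : List String) (out : List String × List String) :
    Decidable (Spec_find_classes tokens out) := by unfold Spec_find_classes; infer_instance

-- ===== CLAIM (what is proved, stated in full; the proofs are below) =====
def Claim_equal_find_classes : Prop :=
  ∀ (tokens : List String), Dom_find_classes tokens → Pre_find_classes tokens →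
    Spec_find_classes tokens (find_classes tokens)

-- ===== LEMMAS AND PROOFS =====

-- specification of the first-'{'-at-or-after search, used to relate both ports
def pvFB : List String → Nat → Option Nat
  | [], _ => none
  | t :: r, base => if t = "{" then some base else pvFB r (base + 1)

theorem pvNextBrace_headD (l : List String) (i0 : Nat) :
    (pvNextBrace l i0).headD none = pvFB l i0 := by
  induction l generalizing i0 with
  | nil => simp [pvNextBrace, pvFB]
  | cons t rest ih =>
    simp only [pvNextBrace, pvFB, List.headD_cons]
    rw [ih]

theorem pvNextBrace_getD (l : List String) (i0 k : Nat) :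
    (pvNextBrace l i0).getD k none = pvFB (l.drop k) (i0 + k) := by
  induction l generalizing i0 k with
  | nil => cases k <;> simp [pvNextBrace, pvFB]
  | cons t rest ih =>
    cases k with
    | zero =>
      simp only [pvNextBrace, List.getD_cons_zero, List.drop_zero, pvFB, Nat.add_zero]
      rw [pvNextBrace_headD]
    | succ k =>
      simp only [pvNextBrace, List.getD_cons_succ, List.drop_succ_cons]
      rw [ih]
      have : i0 + 1 + k = i0 + (k + 1) := by omega
      rw [this]

theorem pvScanA_spec (fuel : Nat) (tokens : List String) (i : Nat) :
    ∀ (j : Nat) (idxs : List Nat),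
      i + j < tokens.length → tokens.length ≤ i + j + fuel →
      tokens.getD (i + j) "" ≠ "{" →
      pvScanA tokens i j idxs fuel =
        (pvFB (tokens.drop (i + j + 1)) (i + j + 1)).map (fun p => idxs ++ [p + 1]) := by
  induction fuel with
  | zero => intro j idxs h1 h2 _; omega
  | succ fuel ih =>
    intro j idxs h1 h2 h3
    have hg : PySem.List.pyGet? tokens ((i + j : Nat) : Int) = some tokens[i + j] := by
      rw [PySem.List.pyGet?_natCast, List.getElem?_eq_getElem h1]
    have hgetD : tokens.getD (i + j) "" = tokens[i + j] := List.getD_eq_getElem tokens "" h1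
    rw [show pvScanA tokens i j idxs (fuel + 1) =
        (match PySem.List.pyGet? tokens ((i + j : Nat) : Int) with
         | none => none
         | some t =>
           if t = "{" then some idxs
           else
             match PySem.List.pyGet? tokens ((i + j + 1 : Nat) : Int) with
             | none => none
             | some t' =>
               pvScanA tokens i (j+1) (if t' = "{" then idxs ++ [i + j + 2] else idxs) fuel)
        from rfl, hg]
    have hne : ¬ (tokens[i + j] = "{") := by rw [← hgetD]; exact h3
    simp only [hne, if_false]
    by_cases hlt : i + j + 1 < tokens.length
    · have hg2 : PySem.List.pyGet? tokens ((i + j + 1 : Nat) : Int) = some tokens[i + j + 1] := by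
        rw [PySem.List.pyGet?_natCast, List.getElem?_eq_getElem hlt]
      rw [hg2]
      dsimp only
      have hdrop : tokens.drop (i + j + 1) = tokens[i + j + 1] :: tokens.drop (i + j + 2) := by
        rw [List.drop_eq_getElem_cons hlt]
      by_cases hb : tokens[i + j + 1] = "{"
      · -- the next token is the brace: one more iteration, then the loop exits
        rw [if_pos hb]
        obtain ⟨f, rfl⟩ : ∃ f, fuel = f + 1 := ⟨fuel - 1, by omega⟩
        have hg3 : PySem.List.pyGet? tokens ((i + (j+1) : Nat) : Int) = some tokens[i + j + 1] := by
          have : i + (j + 1) = i + j + 1 := by omega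
          rw [this]; exact hg2
        rw [show pvScanA tokens i (j+1) (idxs ++ [i + j + 2]) (f + 1) =
            (match PySem.List.pyGet? tokens ((i + (j+1) : Nat) : Int) with
             | none => none
             | some t =>
               if t = "{" then some (idxs ++ [i + j + 2])
               else
                 match PySem.List.pyGet? tokens ((i + (j+1) + 1 : Nat) : Int) with
                 | none => none
                 | some t' =>
                   pvScanA tokens i (j+1+1)
                     (if t' = "{" then (idxs ++ [i + j + 2]) ++ [i + (j+1) + 2]
                      else idxs ++ [i + j + 2]) f)
            from rfl]
        rw [hg3]
        dsimp only
        rw [if_pos hb, hdrop]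
        simp only [pvFB, if_pos hb, Option.map_some]
      · rw [if_neg hb]
        have h1' : i + (j + 1) < tokens.length := by omega
        have h2' : tokens.length ≤ i + (j + 1) + fuel := by omega
        have h3' : tokens.getD (i + (j + 1)) "" ≠ "{" := by
          rw [show i + (j + 1) = i + j + 1 from by omega,
            List.getD_eq_getElem tokens "" hlt]
          exact hb
        rw [ih (j + 1) idxs h1' h2' h3', hdrop]
        rw [show i + (j + 1) + 1 = i + j + 2 from by omega]
        simp only [pvFB, if_neg hb]
    · -- next index out of range: Python raises IndexError; no '{' after i+j
      have hg2 : PySem.List.pyGet? tokens ((i + j + 1 : Nat) : Int) = none := by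
        rw [PySem.List.pyGet?_natCast]
        simp only [List.getElem?_eq_none_iff]
        omega
      rw [hg2]
      have : tokens.drop (i + j + 1) = [] := List.drop_eq_nil_of_le (by omega)
      rw [this]
      simp [pvFB]

theorem ins_ge (l : List String) (p : Nat) (h : l.length ≤ p) (v : String) :
    PySem.List.insert l (p : Int) v = l ++ [v] := by
  simp only [PySem.List.insert, PySem.List.sliceIndices]
  have h1 : ¬ ((p : Int) < 0) := by omega
  have h3 : min (p : Int) (l.length : Int) = l.length := by omega
  simp [h1, h3]

-- A's pair of list.insert calls equals B's slice splice, for every position (Python clamps)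
theorem ins_pair (l : List String) (p : Nat) :
    PySem.List.insert (PySem.List.insert l (p : Int) "\n") ((p : Int) + 1) "public:"
      = pvSplice l p := by
  unfold pvSplice
  have hcast : ((p : Int) + 1) = ((p + 1 : Nat) : Int) := by push_cast; ring
  by_cases h : p ≤ l.length
  · rw [PySem.List.insert_natCast l p "\n" h, hcast,
      PySem.List.insert_natCast _ (p+1) "public:" (by simp; omega)]
    have h1 : (l.take p ++ "\n" :: l.drop p).take (p+1) = l.take p ++ ["\n"] := by
      rw [List.take_append]
      simp [h, List.take_of_length_le]
    have h2 : (l.take p ++ "\n" :: l.drop p).drop (p+1) = l.drop p := by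
      rw [List.drop_append]
      simp [h]
    rw [h1, h2]
    simp
  · rw [not_le] at h
    rw [ins_ge l p (by omega), hcast, ins_ge _ (p+1) (by simp; omega)]
    simp [List.take_of_length_le (by omega : l.length ≤ p),
      List.drop_of_length_le (by omega : l.length ≤ p)]

theorem insert_loops_eq (idxs : List Nat) (l : List String) :
    pvInsertLoopA idxs l = idxs.foldl pvSplice l := by
  unfold pvInsertLoopA
  have h : (fun (acc : List String) (p : Nat) =>
      PySem.List.insert (PySem.List.insert acc (p : Int) "\n") ((p : Int) + 1) "public:")
      = pvSplice := funext fun acc => funext fun p => ins_pair acc p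
  rw [h]

-- the two ports compute the same (classes, insert positions) state
theorem fold_states_eq (tokens : List String) :
    (List.range (tokens.length - 1)).foldl (fun st i =>
      if tokens.getD i "" = "class" then
        let classes := st.1 ++ [tokens.getD (i+1) ""]
        match pvScanA tokens i 0 st.2 tokens.length with
        | some idxs => (classes, idxs)
        | none => (classes, st.2)
      else st) (([] : List String), ([] : List Nat))
    = (List.range (tokens.length - 1)).foldl (fun st i =>
      if tokens.getD i "" = "class" then
        match (pvNextBrace tokens 0).getD (i+1) none with
        | some p => (st.1 ++ [tokens.getD (i+1) ""], st.2 ++ [p + 1])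
        | none => (st.1 ++ [tokens.getD (i+1) ""], st.2)
      else st) (([] : List String), ([] : List Nat)) := by
  apply PySem.List.foldl_congr_mem
  intro st i hi
  have hi' : i < tokens.length - 1 := List.mem_range.mp hi
  by_cases hc : tokens.getD i "" = "class"
  · rw [if_pos hc, if_pos hc]
    have h1 : i + 0 < tokens.length := by omega
    have h3 : tokens.getD (i + 0) "" ≠ "{" := by
      rw [Nat.add_zero, hc]; decide
    rw [pvScanA_spec tokens.length tokens i 0 st.2 h1 (by omega) h3]
    rw [pvNextBrace_getD, Nat.zero_add]
    rw [show i + 0 + 1 = i + 1 from by omega]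
    cases pvFB (tokens.drop (i + 1)) (i + 1) <;> simp
  · rw [if_neg hc, if_neg hc]

-- the two ports agree on EVERY input (outside Pre_ the A-port's error path happens to coincide)
theorem ports_eq (tokens : List String) : find_classes tokens = find_classes_alt tokens := by
  unfold find_classes find_classes_alt
  simp only [fold_states_eq tokens, insert_loops_eq]

-- ===== VERDICT (by name: the statement is the Claim_ definition above) =====
theorem find_classes_spec : Claim_equal_find_classes := by
  intro tokens _ _
  unfold Spec_find_classes
  exact ports_eq tokens
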